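-- pv_equiv track=rewrite | github.com/Leonardo-Miguel/beecrowd_URI_judge_solutions | 02_ad-hoc/1470.py | bending_machine
-- ===== SOURCE A (Python) =====
-- def bending_machine(divisor, content_tape_1):
--
--     content_tape_1_bend = content_tape_1[0:divisor]
--     content_tape_2_bend = content_tape_1[divisor:len(content_tape_1)]
--     len_content_tape_1_bend = len(content_tape_1_bend)
--     len_content_tape_2_bend = len(content_tape_2_bend)
--
--     bigger = 1
--     if len(content_tape_1_bend) < len(content_tape_2_bend):
--         bigger = 2
--
--     # preenchendo a partição menor com zeros, para ambas terem o mesmo tamanho e facilitar a soma elemento à elemento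
--     if bigger == 1:
--         difference_len = len_content_tape_1_bend - len_content_tape_2_bend
--         for _ in range(len_content_tape_2_bend, len_content_tape_2_bend + difference_len):
--             content_tape_2_bend.append(0)
--     else:
--         difference_len = len_content_tape_2_bend - len_content_tape_1_bend
--         for _ in range(len_content_tape_1_bend, len_content_tape_1_bend + difference_len):
--             content_tape_1_bend.insert(0, 0)
--
--     # IMPORTANTE! É a fita 2 que dobra (ou inverte para a soma)
--     inverted_tape_2 = content_tape_2_bend[::-1]
--     bended_tape = [content_tape_1_bend[i] + inverted_tape_2[i] for i in range(len(content_tape_1_bend))]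
--
--     return bended_tape
-- ===== SOURCE B (Python) =====
-- def bending_machine(divisor, content_tape_1):
--     n = len(content_tape_1)
--     d = divisor + n if divisor < 0 else divisor
--     d = 0 if d < 0 else (n if d > n else d)
--     length = d if d > n - d else n - d
--     out = [0] * length
--     for j, x in enumerate(content_tape_1):
--         p = j + (length - d) if j < d else length - 1 - (j - d)
--         out[p] += x
--     return out
-- ===== Notes on version B (the rewrite author's own statement) =====
-- stated objective: alternative
-- what changed: Instead of slicing into two halves, padding the shorter with zeros and zipping one half against the reversal of the other, B computes the fold point and output length arithmetically, allocates a zero array once, and makes a single scatter/accumulate pass over the original tape adding each element into its folded position; no slicing, padding, reversal or zip remains.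
import Mathlib
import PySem

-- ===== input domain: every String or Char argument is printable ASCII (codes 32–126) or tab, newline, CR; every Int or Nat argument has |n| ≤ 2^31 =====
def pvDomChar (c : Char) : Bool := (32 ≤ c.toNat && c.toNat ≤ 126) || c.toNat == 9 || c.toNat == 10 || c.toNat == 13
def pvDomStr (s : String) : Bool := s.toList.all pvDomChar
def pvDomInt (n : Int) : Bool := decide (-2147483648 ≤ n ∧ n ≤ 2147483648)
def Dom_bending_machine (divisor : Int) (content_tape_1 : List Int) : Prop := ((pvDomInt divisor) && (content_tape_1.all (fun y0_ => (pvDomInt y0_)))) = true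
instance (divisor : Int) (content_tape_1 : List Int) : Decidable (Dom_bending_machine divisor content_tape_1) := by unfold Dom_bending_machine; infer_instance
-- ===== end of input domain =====

-- B replaces A's split/pad/reverse/zip pipeline by a single scatter pass: it computes
-- the fold point and output length arithmetically, allocates a zero array once, and
-- adds each element of the original tape into its folded position (objective: alternative).

-- ===== PORT A =====
def bending_machine (divisor : Int) (content_tape_1 : List Int) : List Int :=
  let content_tape_1_bend := PySem.List.slice content_tape_1 (some 0) (some divisor)
  let content_tape_2_bend := PySem.List.slice content_tape_1 (some divisor) (some (content_tape_1.length : Int))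
  let len_content_tape_1_bend : Int := content_tape_1_bend.length
  let len_content_tape_2_bend : Int := content_tape_2_bend.length
  let bigger : Int := if content_tape_1_bend.length < content_tape_2_bend.length then 2 else 1
  let pair :=
    if bigger = 1 then
      let difference_len := len_content_tape_1_bend - len_content_tape_2_bend
      (content_tape_1_bend,
       (PySem.List.pyRange len_content_tape_2_bend (len_content_tape_2_bend + difference_len) 1).foldl
         (fun acc _ => acc ++ [(0 : Int)]) content_tape_2_bend)
    else
      let difference_len := len_content_tape_2_bend - len_content_tape_1_bend
      ((PySem.List.pyRange len_content_tape_1_bend (len_content_tape_1_bend + difference_len) 1).foldl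
         (fun acc _ => PySem.List.insert acc 0 0) content_tape_1_bend,
       content_tape_2_bend)
  let inverted_tape_2 := (PySem.List.slice? pair.2 none none (-1)).getD []
  (PySem.List.pyRange 0 (pair.1.length : Int) 1).map
    (fun i => PySem.List.pyGetD pair.1 i 0 + PySem.List.pyGetD inverted_tape_2 i 0)

-- ===== PORT B =====
-- single pass: scatter each element into its folded position of a zero array
-- (out[p] += x is ported with pyGetD/pySetD; p is always in range, as the proof shows)
def bending_machine_alt (divisor : Int) (content_tape_1 : List Int) : List Int :=
  let n : Int := content_tape_1.length
  let d0 : Int := if divisor < 0 then divisor + n else divisor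
  let d : Int := if d0 < 0 then 0 else if d0 > n then n else d0
  let length : Int := if d > n - d then d else n - d
  let out : List Int := List.replicate length.toNat 0
  (PySem.List.enumerate content_tape_1).foldl
    (fun acc jx =>
      let p : Int := if jx.1 < d then jx.1 + (length - d) else length - 1 - (jx.1 - d)
      PySem.List.pySetD acc p (PySem.List.pyGetD acc p 0 + jx.2)) out

-- ===== PRECONDITION & SPEC =====
def Spec_bending_machine (divisor : Int) (content_tape_1 : List Int) (out : List Int) : Prop := out = bending_machine_alt divisor content_tape_1
instance (divisor : Int) (content_tape_1 : List Int) (out : List Int) : Decidable (Spec_bending_machine divisor content_tape_1 out) := by unfold Spec_bending_machine; infer_instance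

-- ===== CLAIM (what is proved, stated in full; the proofs are below) =====
def Claim_equal_bending_machine : Prop := ∀ (divisor : Int) (content_tape_1 : List Int), Dom_bending_machine divisor content_tape_1 → Spec_bending_machine divisor content_tape_1 (bending_machine divisor content_tape_1)

-- ===== LEMMAS AND PROOFS =====

-- the scatter step of B, named for the proofs
def pvSetAdd (acc : List Int) (p : Int) (x : Int) : List Int :=
  PySem.List.pySetD acc p (PySem.List.pyGetD acc p 0 + x)

theorem pvZipZeroRight (acc : List Int) :
    List.zipWith (· + ·) acc (List.replicate acc.length 0) = acc := by
  induction acc with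
  | nil => rfl
  | cons a t ih => simp [List.replicate_succ, ih]

theorem pvZipZeroLeft (l : List Int) (m : Nat) (h : m = l.length) :
    List.zipWith (· + ·) (List.replicate m 0) l = l := by
  subst h
  induction l with
  | nil => rfl
  | cons a t ih => simp [List.replicate_succ, ih]

theorem pvZipTransfer : ∀ (pre acc : List Int) (y : Int) (suf : List Int),
    pre.length < acc.length →
    List.zipWith (· + ·) acc (pre ++ y :: suf)
      = List.zipWith (· + ·) (acc.set pre.length (acc.getD pre.length 0 + y)) (pre ++ 0 :: suf) := by
  intro pre
  induction pre with
  | nil =>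
    intro acc y suf h
    cases acc with
    | nil => simp at h
    | cons a t => simp [List.getD]
  | cons p ps ih =>
    intro acc y suf h
    cases acc with
    | nil => simp at h
    | cons a t =>
      simp only [List.cons_append, List.zipWith_cons_cons, List.length_cons, List.set_cons_succ,
        List.getD_cons_succ]
      rw [ih t y suf (by simpa using h)]

theorem pvSetAddEq (acc : List Int) (p : Int) (x : Int) (h0 : 0 ≤ p) :
    pvSetAdd acc p x = acc.set p.toNat (acc.getD p.toNat 0 + x) := by
  unfold pvSetAdd
  rw [show p = ((p.toNat : Nat) : Int) by omega, PySem.List.pyGetD_natCast,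
    PySem.List.pySetD_natCast]
  simp only [Int.toNat_natCast, List.getD_eq_getElem?_getD]

theorem pvFoldAsc (ys : List Int) (c : Int) : ∀ (s : Int) (acc : List Int),
    0 ≤ s + c → s + c + ys.length ≤ acc.length →
    (PySem.List.enumerate ys s).foldl (fun acc jx => pvSetAdd acc (jx.1 + c) jx.2) acc
      = List.zipWith (· + ·) acc
          (List.replicate (s + c).toNat 0 ++ ys ++ List.replicate (acc.length - (s + c).toNat - ys.length) 0) := by
  induction ys with
  | nil =>
    intro s acc h0 h1
    simp only [PySem.List.enumerate_nil, List.foldl_nil, List.length_nil, List.append_nil,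
      Nat.sub_zero]
    rw [← List.replicate_add, show (s + c).toNat + (acc.length - (s + c).toNat) = acc.length by omega,
      pvZipZeroRight]
  | cons y ys ih =>
    intro s acc h0 h1
    rw [PySem.List.enumerate_cons, List.foldl_cons]
    have hlt : (s + c).toNat < acc.length := by
      have := h1; simp only [List.length_cons] at this; omega
    rw [pvSetAddEq acc (s + c) y h0]
    rw [ih (s + 1) _ (by omega) (by simp only [List.length_set, List.length_cons] at h1 ⊢; omega)]
    have e1 : (s + 1 + c).toNat = (s + c).toNat + 1 := by omega
    rw [e1, List.length_set]
    have e2 : List.replicate ((s + c).toNat + 1) (0 : Int) ++ ys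
        = List.replicate (s + c).toNat 0 ++ 0 :: ys := by
      rw [List.replicate_succ']; simp
    rw [e2]
    have e3 : acc.length - ((s + c).toNat + 1) - ys.length
        = acc.length - (s + c).toNat - (y :: ys).length := by
      simp only [List.length_cons]; omega
    rw [e3]
    have := pvZipTransfer (List.replicate (s + c).toNat 0) acc y
      (ys ++ List.replicate (acc.length - (s + c).toNat - (y :: ys).length) 0)
      (by simpa using hlt)
    simp only [List.append_assoc, List.cons_append, List.length_replicate] at this ⊢
    rw [← this]

theorem pvFoldDesc (ys : List Int) (c : Int) : ∀ (s : Int) (acc : List Int),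
    (ys.length : Int) ≤ c - s + 1 → 0 ≤ c - s + 1 → c - s + 1 ≤ acc.length →
    (PySem.List.enumerate ys s).foldl (fun acc jx => pvSetAdd acc (c - jx.1) jx.2) acc
      = List.zipWith (· + ·) acc
          (List.replicate ((c - s + 1).toNat - ys.length) 0 ++ ys.reverse
            ++ List.replicate (acc.length - (c - s + 1).toNat) 0) := by
  induction ys with
  | nil =>
    intro s acc h0 h1 h2
    simp only [PySem.List.enumerate_nil, List.foldl_nil, List.length_nil, Nat.sub_zero,
      List.reverse_nil, List.append_nil]
    rw [← List.replicate_add,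
      show (c - s + 1).toNat + (acc.length - (c - s + 1).toNat) = acc.length by omega,
      pvZipZeroRight]
  | cons y ys ih =>
    intro s acc h0 h1 h2
    rw [PySem.List.enumerate_cons, List.foldl_cons]
    have hge : 0 ≤ c - s := by simp only [List.length_cons] at h0; push_cast at h0; omega
    have hlt : (c - s).toNat < acc.length := by omega
    rw [pvSetAddEq acc (c - s) y hge]
    have hlen : (ys.length : Int) ≤ c - (s + 1) + 1 := by
      simp only [List.length_cons] at h0; push_cast at h0 ⊢; omega
    rw [ih (s + 1) _ hlen (by omega) (by simp only [List.length_set]; omega)]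
    rw [List.length_set]
    have e1 : (c - (s + 1) + 1).toNat = (c - s + 1).toNat - 1 := by omega
    have e2 : acc.length - ((c - s + 1).toNat - 1) = (acc.length - (c - s + 1).toNat) + 1 := by
      omega
    rw [e1, e2, List.replicate_succ]
    -- recursive RHS = zipWith acc' (pre ++ 0 :: suf) with pre = rep ((c-s+1).toNat-1-len) ++ ys.reverse
    have hys : (ys.length : Int) ≤ c - s := by
      simp only [List.length_cons] at h0; push_cast at h0; omega
    have hpre : ((List.replicate ((c - s + 1).toNat - 1 - ys.length) (0 : Int)) ++ ys.reverse).length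
        = (c - s).toNat := by
      simp only [List.length_append, List.length_replicate, List.length_reverse]; omega
    have := pvZipTransfer
      (List.replicate ((c - s + 1).toNat - 1 - ys.length) (0 : Int) ++ ys.reverse) acc y
      (List.replicate (acc.length - (c - s + 1).toNat) 0)
      (by rw [hpre]; exact hlt)
    rw [hpre] at this
    have e3 : (c - s + 1).toNat - 1 - ys.length = (c - s + 1).toNat - (y :: ys).length := by
      simp only [List.length_cons]; omega
    simp only [List.append_assoc, List.cons_append, List.reverse_cons] at this ⊢
    rw [← e3]
    exact this.symm

-- generic foldl congruence on members
theorem pvFoldlCongr {α β : Type} : ∀ (l : List α) (f g : β → α → β) (b : β),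
    (∀ acc x, x ∈ l → f acc x = g acc x) → l.foldl f b = l.foldl g b := by
  intro l
  induction l with
  | nil => intro f g b _; rfl
  | cons x t ih =>
    intro f g b h
    simp only [List.foldl_cons]
    rw [h b x (by simp)]
    exact ih f g (g b x) (fun acc y hy => h acc y (by simp [hy]))

-- A-side helpers (padding loops, comprehension, slice normalisation)
theorem pvFoldAppend (l : List Int) (init : List Int) :
    l.foldl (fun acc _ => acc ++ [(0 : Int)]) init = init ++ List.replicate l.length 0 := by
  induction l generalizing init with
  | nil => simp
  | cons _ t ih =>
    simp only [List.foldl_cons, List.length_cons, List.replicate_succ]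
    rw [ih, List.append_assoc, List.singleton_append]

theorem pvInsertZero (xs : List Int) (v : Int) : PySem.List.insert xs 0 v = v :: xs := by
  simp [PySem.List.insert, PySem.List.sliceIndices]

theorem pvFoldInsert (l : List Int) (init : List Int) :
    l.foldl (fun acc _ => PySem.List.insert acc 0 0) init = List.replicate l.length 0 ++ init := by
  induction l generalizing init with
  | nil => simp
  | cons _ t ih =>
    simp [List.foldl_cons, pvInsertZero, List.replicate_succ']

theorem pvCompEq (u v : List Int) (h : u.length = v.length) :
    (PySem.List.pyRange 0 (u.length : Int) 1).map
      (fun i => PySem.List.pyGetD u i 0 + PySem.List.pyGetD v i 0) = List.zipWith (· + ·) u v := by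
  rw [PySem.List.pyRange_zero_nat, List.map_map]
  apply List.ext_getElem
  · simp [h]
  · intro k h1 h2
    simp only [List.length_map, List.length_range] at h1
    simp [List.getElem_map, List.getElem_range, PySem.List.pyGetD_natCast,
      List.getD_eq_getElem?_getD, h1, h ▸ h1]

theorem pvSliceToLen (xs : List Int) (d : Int) :
    PySem.List.slice xs (some d) (some (xs.length : Int)) = PySem.List.slice xs (some d) none := by
  simp [PySem.List.slice, PySem.List.clampIdx]
  split_ifs <;> omega

theorem pvTakeClamp {α : Type} (xs : List α) (j : Nat) : xs.take j = xs.take (min j xs.length) := by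
  rcases le_total j xs.length with h | h
  · rw [Nat.min_eq_left h]
  · rw [Nat.min_eq_right h, List.take_of_length_le h, List.take_length]

theorem pvDropClamp {α : Type} (xs : List α) (j : Nat) : xs.drop j = xs.drop (min j xs.length) := by
  rcases le_total j xs.length with h | h
  · rw [Nat.min_eq_left h]
  · rw [Nat.min_eq_right h, List.drop_eq_nil_of_le h, List.drop_length]

theorem pvClampEq (xs : List Int) (i : Int) :
    ∃ k : Nat, k ≤ xs.length ∧
      PySem.List.slice xs none (some i) = xs.take k ∧
      PySem.List.slice xs (some i) none = xs.drop k ∧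
      (if (if i < 0 then i + (xs.length : Int) else i) < 0 then 0
       else if (if i < 0 then i + (xs.length : Int) else i) > (xs.length : Int) then (xs.length : Int)
       else (if i < 0 then i + (xs.length : Int) else i)) = (k : Int) := by
  by_cases hi : i < 0
  · refine ⟨xs.length - (-i).toNat, by omega, ?_, ?_, ?_⟩
    · rw [show i = -(((-i).toNat : Nat) : Int) by omega,
        PySem.List.slice_to_neg_natCast xs _ (by omega)]
      congr 1; omega
    · rw [show i = -(((-i).toNat : Nat) : Int) by omega,
        PySem.List.slice_from_neg_natCast xs _ (by omega)]
      congr 1; omega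
    · split_ifs <;> omega
  · refine ⟨min i.toNat xs.length, by omega, ?_, ?_, ?_⟩
    · rw [show i = ((i.toNat : Nat) : Int) by omega, PySem.List.slice_to_natCast,
        pvTakeClamp]
      rw [Int.toNat_natCast]
    · rw [show i = ((i.toNat : Nat) : Int) by omega, PySem.List.slice_from_natCast,
        pvDropClamp]
      rw [Int.toNat_natCast]
    · split_ifs <;> omega

theorem pvScatter (xs : List Int) (k : Nat) (hk : k ≤ xs.length) (L : Nat)
    (hL : L = max k (xs.length - k)) :
    (PySem.List.enumerate xs 0).foldl (fun acc jx =>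
        let p : Int := if jx.1 < (k : Int) then jx.1 + ((L : Int) - (k : Int))
          else (L : Int) - 1 - (jx.1 - (k : Int))
        PySem.List.pySetD acc p (PySem.List.pyGetD acc p 0 + jx.2))
      (List.replicate ((L : Int)).toNat 0)
    = List.zipWith (· + ·) (List.replicate (L - k) 0 ++ xs.take k)
        (List.replicate (L - (xs.length - k)) 0 ++ (xs.drop k).reverse) := by
  have hu : (xs.take k).length = k := by simp [Nat.min_eq_left hk]
  have hv : (xs.drop k).length = xs.length - k := by simp
  conv_lhs => rw [← List.take_append_drop k xs]
  rw [PySem.List.enumerate_append, List.foldl_append, hu]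
  -- first pass: ascending positions j + (L - k) for j < k
  rw [pvFoldlCongr (PySem.List.enumerate (xs.take k) 0) _
      (fun acc jx => pvSetAdd acc (jx.1 + ((L : Int) - (k : Int))) jx.2) _
      (by
        intro acc x hx
        rw [PySem.List.mem_enumerate_iff] at hx
        obtain ⟨kk, hkk, rfl⟩ := hx
        rw [hu] at hkk
        simp only [zero_add]
        rw [if_pos (by exact_mod_cast hkk)]
        rfl)]
  rw [pvFoldAsc (xs.take k) ((L : Int) - (k : Int)) 0 _ (by omega)
      (by simp only [hu, List.length_replicate]; omega)]
  rw [List.length_replicate, hu]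
  have e1 : ((0 : Int) + ((L : Int) - (k : Int))).toNat = L - k := by omega
  have e2 : ((L : Int)).toNat - (L - k) - k = 0 := by omega
  rw [e1, e2, List.replicate_zero, List.append_nil,
    pvZipZeroLeft _ _ (by simp [hu]; omega)]
  -- second pass: descending positions (L - 1 + k) - j for j ≥ k
  rw [pvFoldlCongr (PySem.List.enumerate (xs.drop k) (0 + (k : Int))) _
      (fun acc jx => pvSetAdd acc (((L : Int) - 1 + (k : Int)) - jx.1) jx.2) _
      (by
        intro acc x hx
        rw [PySem.List.mem_enumerate_iff] at hx
        obtain ⟨kk, hkk, rfl⟩ := hx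
        simp only [zero_add]
        rw [if_neg (by omega)]
        show pvSetAdd _ ((L : Int) - 1 - (((k : Int) + (kk : Int)) - (k : Int))) _ = _
        rw [show (L : Int) - 1 - (((k : Int) + (kk : Int)) - (k : Int))
            = ((L : Int) - 1 + (k : Int)) - ((k : Int) + (kk : Int)) by ring])]
  rw [pvFoldDesc (xs.drop k) ((L : Int) - 1 + (k : Int)) (0 + (k : Int)) _
      (by rw [hv]; omega) (by omega)
      (by simp only [List.length_append, List.length_replicate, hu]; omega)]
  have e3 : ((L : Int) - 1 + (k : Int) - (0 + (k : Int)) + 1).toNat = L := by omega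
  rw [e3, hv, List.length_append, List.length_replicate, hu,
    show L - k + k - L = 0 by omega, List.replicate_zero, List.append_nil]

-- the bridge: with the clamp point k in hand, A and B coincide
theorem pvMain (xs : List Int) (i : Int) (k : Nat) (hk : k ≤ xs.length)
    (ha : PySem.List.slice xs none (some i) = xs.take k)
    (hb : PySem.List.slice xs (some i) none = xs.drop k)
    (hd : (if (if i < 0 then i + (xs.length : Int) else i) < 0 then 0
           else if (if i < 0 then i + (xs.length : Int) else i) > (xs.length : Int) then (xs.length : Int)
           else (if i < 0 then i + (xs.length : Int) else i)) = (k : Int)) :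
    bending_machine i xs = bending_machine_alt i xs := by
  unfold bending_machine bending_machine_alt
  simp only [PySem.List.slice_zero_start, pvSliceToLen, ha, hb, hd]
  have hu : (List.take k xs).length = k := by simp [Nat.min_eq_left hk]
  have hv : (List.drop k xs).length = xs.length - k := by simp
  have hL : (if ((k : Int)) > ((xs.length : Int)) - ((k : Int)) then ((k : Int))
      else ((xs.length : Int)) - ((k : Int))) = ((max k (xs.length - k) : Nat) : Int) := by
    split_ifs <;> push_cast <;> omega
  rw [hL, pvScatter xs k hk (max k (xs.length - k)) rfl]
  simp only [hu, hv]
  by_cases hlt : k < xs.length - k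
  · -- second half longer: A pads the first half in front with zeros
    rw [if_pos hlt, if_neg (by norm_num : ¬ (2 : Int) = 1)]
    simp only []
    rw [pvFoldInsert, PySem.List.slice?_none_none_neg_one]
    simp only [Option.getD_some, PySem.List.length_pyRange_one]
    rw [show (k : Int) + (((xs.length - k : Nat) : Int) - (k : Int)) - (k : Int)
        = ((xs.length - k : Nat) : Int) - (k : Int) by ring]
    rw [show (((xs.length - k : Nat) : Int) - (k : Int)).toNat = (xs.length - k) - k by omega]
    rw [pvCompEq _ _ (by simp [hu]; omega)]
    rw [show max k (xs.length - k) - (xs.length - k) = 0 by omega, List.replicate_zero,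
      List.nil_append,
      show max k (xs.length - k) - k = (xs.length - k) - k by omega]
  · -- first half at least as long: A pads the second half at the back with zeros
    rw [if_neg hlt, if_pos rfl]
    simp only []
    rw [pvFoldAppend, PySem.List.slice?_none_none_neg_one]
    simp only [Option.getD_some, PySem.List.length_pyRange_one]
    rw [show ((xs.length - k : Nat) : Int) + ((k : Int) - ((xs.length - k : Nat) : Int))
        - ((xs.length - k : Nat) : Int) = (k : Int) - ((xs.length - k : Nat) : Int) by ring]
    rw [show ((k : Int) - ((xs.length - k : Nat) : Int)).toNat = k - (xs.length - k) by omega]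
    rw [List.reverse_append, List.reverse_replicate]
    rw [pvCompEq _ _ (by simp [hu]; omega)]
    rw [show max k (xs.length - k) - k = 0 by omega, List.replicate_zero, List.nil_append,
      show max k (xs.length - k) - (xs.length - k) = k - (xs.length - k) by omega]

-- ===== VERDICT (by name: the statement is the Claim_ definition above) =====
theorem bending_machine_spec : Claim_equal_bending_machine := by
  intro divisor xs _
  unfold Spec_bending_machine
  obtain ⟨k, hk, ha, hb, hd⟩ := pvClampEq xs divisor
  exact pvMain xs divisor k hk ha hb hd
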